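-- pv_equiv track=rewrite | github.com/brianpadim20/techTestIsiMarkets | ISI Markets/min_jump_cost.py | minJumpCost
-- ===== SOURCE A (Python) =====
-- def minJumpCost(stones):
--     def cycle_cost(path):
--         full_path = path + path[-2:0:-1] + [path[0]]
--         return max(abs(full_path[i+1] - full_path[i]) for i in range(len(full_path)-1))
--
--     # Ruta 1: posiciones pares primero, luego impares al revés
--     path1 = stones[::2] + stones[-2::-2]
--
--     # Ruta 2: posiciones impares primero, luego pares al revés
--     path2 = stones[1::2] + stones[-1::-2]
--
--     # Ruta 3: alternando extremos hacia el centro (para cubrir casos como el de 22)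
--     left, right = 0, len(stones) - 1
--     path3 = []
--     while left <= right:
--         path3.append(stones[left])
--         if left != right:
--             path3.append(stones[right])
--         left += 1
--         right -= 1
--
--     return min(cycle_cost(path1), cycle_cost(path2), cycle_cost(path3))
-- ===== SOURCE B (Python) =====
-- def minJumpCost(stones):
--     def cost(path):
--         m = 0
--         for a, b in zip(path, path[1:]):
--             m = max(m, abs(b - a))
--         return m
--
--     path1 = stones[::2] + stones[-2::-2]
--     path2 = stones[1::2] + stones[-1::-2]
--     path3 = [v for pair in zip(stones, stones[::-1]) for v in pair][:len(stones)]
--     return min(cost(path1), cost(path2), cost(path3))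
-- ===== Notes on version B (the rewrite author's own statement) =====
-- stated objective: simpler
-- what changed: Each path's cost is computed directly as a running max over the path's own adjacent gaps (A instead materialises path + reversed-middle + [start] and scans its ~2n gaps via an index generator), and path3 is built by one zip-interleave of the list with its reverse truncated to n instead of A's two-pointer while loop.
import Mathlib
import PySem

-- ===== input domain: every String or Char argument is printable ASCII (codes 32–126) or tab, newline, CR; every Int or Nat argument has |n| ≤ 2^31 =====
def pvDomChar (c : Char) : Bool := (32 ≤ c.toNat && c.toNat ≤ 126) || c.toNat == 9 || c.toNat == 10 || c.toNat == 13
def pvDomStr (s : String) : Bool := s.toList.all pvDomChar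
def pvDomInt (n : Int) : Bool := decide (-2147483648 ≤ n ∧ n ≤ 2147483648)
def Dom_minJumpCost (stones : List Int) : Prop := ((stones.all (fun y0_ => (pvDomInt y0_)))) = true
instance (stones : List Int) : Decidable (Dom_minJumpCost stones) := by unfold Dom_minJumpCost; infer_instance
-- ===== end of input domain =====

-- B computes each path's cost directly as a running max over the path's adjacent gaps
-- (skipping A's materialised path+reversed-middle+start cycle) and builds path3 by a
-- zip-interleave instead of A's two-pointer while loop; objective: simpler.


-- ===== PORT A =====
-- cycle_cost: full_path = path + path[-2:0:-1] + [path[0]]; max over its adjacent gaps.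
-- (the pyGetD/.getD defaults are only reached when path = [], which Pre_ excludes)
def pvCycleCost (path : List Int) : Int :=
  let fullPath := path ++ ((PySem.List.slice? path (some (-2)) (some 0) (-1)).getD [])
      ++ [PySem.List.pyGetD path 0 0]
  (PySem.List.max?
      ((PySem.List.pyRange 0 (PySem.List.len fullPath - 1) 1).map
        (fun i => |PySem.List.pyGetD fullPath (i + 1) 0 - PySem.List.pyGetD fullPath i 0|))
      (fun x => x)).getD 0

-- the while loop building path3 (left/right two pointers)
def pvLoop3 (stones : List Int) (left right : Int) (acc : List Int) : List Int :=
  if left ≤ right then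
    let acc1 := acc ++ [PySem.List.pyGetD stones left 0]
    let acc2 := if left ≠ right then acc1 ++ [PySem.List.pyGetD stones right 0] else acc1
    pvLoop3 stones (left + 1) (right - 1) acc2
  else acc
termination_by (right + 1 - left).toNat
decreasing_by omega

def minJumpCost (stones : List Int) : Int :=
  let path1 := (PySem.List.slice? stones none none 2).getD []
      ++ (PySem.List.slice? stones (some (-2)) none (-2)).getD []
  let path2 := (PySem.List.slice? stones (some 1) none 2).getD []
      ++ (PySem.List.slice? stones (some (-1)) none (-2)).getD []
  let path3 := pvLoop3 stones 0 (PySem.List.len stones - 1) []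
  min (pvCycleCost path1) (min (pvCycleCost path2) (pvCycleCost path3))

-- ===== PORT B =====
-- cost: running max of |b - a| over zip(path, path[1:]), starting from 0
def pvCost (path : List Int) : Int :=
  (path.zip (PySem.List.slice path (some 1) none)).foldl (fun m ab => max m |ab.2 - ab.1|) 0

def minJumpCost_alt (stones : List Int) : Int :=
  let path1 := (PySem.List.slice? stones none none 2).getD []
      ++ (PySem.List.slice? stones (some (-2)) none (-2)).getD []
  let path2 := (PySem.List.slice? stones (some 1) none 2).getD []
      ++ (PySem.List.slice? stones (some (-1)) none (-2)).getD []
  let path3 := PySem.List.slice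
      ((stones.zip ((PySem.List.slice? stones none none (-1)).getD [])).flatMap
        (fun ab => [ab.1, ab.2]))
      none (some (PySem.List.len stones))
  min (pvCost path1) (min (pvCost path2) (pvCost path3))

-- ===== PRECONDITION & SPEC =====
-- Pre_ excludes only the empty list, on which A raises IndexError (path[0] of the empty path1).
def Pre_minJumpCost (stones : List Int) : Prop := stones ≠ []
instance (stones : List Int) : Decidable (Pre_minJumpCost stones) := by
  unfold Pre_minJumpCost; infer_instance
def pvWitness_minJumpCost : List Int := ([1, 2] : List Int)

def Spec_minJumpCost (stones : List Int) (out : Int) : Prop := out = minJumpCost_alt stones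
instance (stones : List Int) (out : Int) : Decidable (Spec_minJumpCost stones out) := by
  unfold Spec_minJumpCost; infer_instance

-- ===== CLAIM (what is proved, stated in full; the proofs are below) =====
def Claim_equal_minJumpCost : Prop := ∀ (stones : List Int), Dom_minJumpCost stones →
  Pre_minJumpCost stones → Spec_minJumpCost stones (minJumpCost stones)
-- ===== LEMMAS AND PROOFS =====

-- adjacent gaps of a path
def pvGaps : List Int → List Int
  | a :: b :: t => |b - a| :: pvGaps (b :: t)
  | _ => []

theorem pvGaps_eq_zip : ∀ (l : List Int),
    (l.zip l.tail).map (fun ab : Int × Int => |ab.2 - ab.1|) = pvGaps l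
  | [] => rfl
  | [a] => rfl
  | a :: b :: t => by simpa [pvGaps] using pvGaps_eq_zip (b :: t)

theorem pvCost_eq (l : List Int) : pvCost l = (pvGaps l).foldl max 0 := by
  simp [pvCost, PySem.List.slice_from_one, ← pvGaps_eq_zip, List.foldl_map]

theorem pvFmax_le {L : List Int} {a c : Int} (h : ∀ x ∈ L, x ≤ c) (ha : a ≤ c) :
    L.foldl max a ≤ c := by
  induction L generalizing a with
  | nil => exact ha
  | cons y t ih =>
    exact ih (fun x hx => h x (List.mem_cons_of_mem _ hx)) (max_le ha (h y (List.mem_cons_self)))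

theorem pvFmax_mem_eq {L₁ L₂ : List Int} (h : ∀ x, x ∈ L₁ ↔ x ∈ L₂) :
    L₁.foldl max 0 = L₂.foldl max 0 := by
  apply le_antisymm
  · exact pvFmax_le (fun x hx => (PySem.List.le_foldl_max L₂ 0).2 x ((h x).mp hx))
      (PySem.List.le_foldl_max L₂ 0).1
  · exact pvFmax_le (fun x hx => (PySem.List.le_foldl_max L₁ 0).2 x ((h x).mpr hx))
      (PySem.List.le_foldl_max L₁ 0).1

theorem pvGaps_append : ∀ (a : List Int) (x : Int) (b : List Int),
    pvGaps (a ++ x :: b) = pvGaps (a ++ [x]) ++ pvGaps (x :: b)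
  | [], x, b => by simp [pvGaps]
  | [y], x, b => by simp [pvGaps]
  | y :: z :: t, x, b => by simpa [pvGaps] using pvGaps_append (z :: t) x b

theorem pvGaps_snoc (l : List Int) (b a : Int) :
    pvGaps ((l ++ [b]) ++ [a]) = pvGaps (l ++ [b]) ++ [|a - b|] := by
  simpa [pvGaps] using pvGaps_append l b [a]

theorem pvGaps_reverse : ∀ (l : List Int), pvGaps l.reverse = (pvGaps l).reverse
  | [] => rfl
  | [a] => rfl
  | a :: b :: t => by
    have ih := pvGaps_reverse (b :: t)
    have h1 : (a :: b :: t).reverse = (t.reverse ++ [b]) ++ [a] := by simp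
    rw [h1, pvGaps_snoc]
    have h2 : t.reverse ++ [b] = (b :: t).reverse := by simp
    rw [h2, ih]
    simp [pvGaps, abs_sub_comm]

-- path[-2:0:-1] is the reversed middle of the path
theorem pvCycleSlice2 (p : List Int) (h : 2 ≤ p.length) :
    PySem.List.slice? p (some (-2)) (some 0) (-1) = some (p.tail.dropLast.reverse) := by
  simp only [PySem.List.slice?, PySem.List.sliceIndices]
  norm_num
  have hc : (if 2 + min 0 ((p.length : Int) - 1) < (p.length : Int) ∨ (p.length : Int) ≤ -1 then
      (max (-2 + (p.length : Int)) (-1) - min 0 ((p.length : Int) - 1)).toNat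
    else 0) = p.length - 2 := by
    split_ifs <;> omega
  rw [hc]
  have key : List.filterMap (fun (x : Nat) => p[(max (-2 + (p.length : Int)) (-1) + -(x : Int)).toNat]?)
      (List.range (p.length - 2))
      = (List.range (p.length - 2)).map (fun x => p.getD (p.length - 2 - x) 0) := by
    rw [List.filterMap_congr (g := fun (x : Nat) => some (p.getD (p.length - 2 - x) 0)) ?_]
    · rw [show (fun (x : Nat) => some (p.getD (p.length - 2 - x) 0))
        = some ∘ (fun (x : Nat) => p.getD (p.length - 2 - x) 0) from rfl, List.filterMap_eq_map]
    · intro x hx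
      simp only [List.mem_range] at hx
      have hidx : (max (-2 + (p.length : Int)) (-1) + -(x : Int)).toNat = p.length - 2 - x := by
        omega
      have hlt : p.length - 2 - x < p.length := by omega
      rw [hidx]
      simp [List.getElem?_eq_getElem hlt]
  rw [key]
  apply List.ext_getElem
  · simp; omega
  · intro i h1 h2
    simp only [List.getElem_map, List.getElem_range, List.getElem_reverse,
      List.getElem_dropLast, List.getElem_tail]
    simp only [List.length_map, List.length_range] at h1
    rw [List.getD_eq_getElem _ _ (by omega)]
    congr 1
    simp only [List.length_reverse, List.length_dropLast, List.length_tail] at h2 ⊢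
    omega

theorem pvCycleSliceAll : ∀ (p : List Int),
    PySem.List.slice? p (some (-2)) (some 0) (-1) = some (p.tail.dropLast.reverse)
  | [] => rfl
  | [a] => rfl
  | a :: b :: t => pvCycleSlice2 (a :: b :: t) (by simp)

-- A's generator over range(len(full)-1) lists the adjacent gaps
theorem pvGapsA_len (l : List Int) :
    (PySem.List.pyRange 0 (PySem.List.len l - 1) 1).map
      (fun i => |PySem.List.pyGetD l (i + 1) 0 - PySem.List.pyGetD l i 0|) =
      (l.zip l.tail).map (fun ab : Int × Int => |ab.2 - ab.1|) := by
  rcases l with _ | ⟨a, t⟩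
  · rfl
  · have hlen : PySem.List.len (a :: t) - 1 = ((t.length : Nat) : Int) := by
      simp [PySem.List.len_eq]
    rw [hlen, PySem.List.pyRange_zero_natCast]
    apply List.ext_getElem
    · simp
    · intro i h1 h2
      simp only [List.length_map, List.length_range] at h1
      simp only [List.getElem_map, List.getElem_range, List.getElem_zip, List.getElem_tail]
      have e1 : ((i : Int) + 1) = (((i + 1 : Nat)) : Int) := by push_cast; ring
      rw [e1, PySem.List.pyGetD_natCast, PySem.List.pyGetD_natCast,
        List.getD_eq_getElem _ _ (by simp; omega), List.getD_eq_getElem _ _ (by simp; omega)]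

-- per-path equivalence: the cycle scan computes the path's max adjacent gap
theorem pvCycleCost_eq (p : List Int) (hp : p ≠ []) : pvCycleCost p = pvCost p := by
  unfold pvCycleCost
  rw [pvCycleSliceAll, Option.getD_some]
  dsimp only
  rw [pvGapsA_len, pvGaps_eq_zip]
  rcases p with _ | ⟨a, t⟩
  · exact absurd rfl hp
  rcases t with _ | ⟨b, t'⟩
  · simp [pvGaps, pvCost, PySem.List.slice_from_one, PySem.List.max?_id_cons,
      PySem.List.pyGetD_zero_cons]
  · set p := a :: b :: t' with hpdef
    have h0 : PySem.List.pyGetD p 0 0 = a := by simp [hpdef, PySem.List.pyGetD_zero_cons]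
    have hstep1 : p.tail.dropLast.reverse ++ [PySem.List.pyGetD p 0 0] = p.dropLast.reverse := by
      rw [h0]
      show (b :: t').dropLast.reverse ++ [a] = (a :: b :: t').dropLast.reverse
      rw [List.dropLast_cons₂, List.reverse_cons]
    have hfull : p ++ p.tail.dropLast.reverse ++ [PySem.List.pyGetD p 0 0]
        = p ++ p.dropLast.reverse := by rw [List.append_assoc, hstep1]
    rw [hfull]
    have hx : p.dropLast ++ [p.getLast hp] = p := List.dropLast_append_getLast hp
    have hsplit : p ++ p.dropLast.reverse = p.dropLast ++ p.getLast hp :: p.dropLast.reverse := by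
      conv_lhs => rw [← hx]
      simp
    have hgaps : pvGaps (p ++ p.dropLast.reverse) = pvGaps p ++ pvGaps p.reverse := by
      rw [hsplit, pvGaps_append, hx]
      have hrev : p.reverse = p.getLast hp :: p.dropLast.reverse := by
        conv_lhs => rw [← hx]
        simp
      rw [hrev]
    rw [hgaps]
    have hcons : pvGaps p ++ pvGaps p.reverse
        = |b - a| :: (pvGaps (b :: t') ++ pvGaps p.reverse) := by
      simp [hpdef, pvGaps]
    rw [hcons, PySem.List.max?_id_cons, Option.getD_some]
    have hrezero : (pvGaps (b :: t') ++ pvGaps p.reverse).foldl max |b - a|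
        = (|b - a| :: (pvGaps (b :: t') ++ pvGaps p.reverse)).foldl max 0 := by
      rw [List.foldl_cons, max_eq_right (abs_nonneg _)]
    rw [hrezero, ← hcons, pvCost_eq]
    apply pvFmax_mem_eq
    intro x
    simp [pvGaps_reverse]

theorem pvFlat_length (ps : List (Int × Int)) :
    (ps.flatMap (fun ab => [ab.1, ab.2])).length = 2 * ps.length := by
  induction ps with
  | nil => rfl
  | cons p ps ih => simp [ih]; omega

theorem pvFlat_drop (ps : List (Int × Int)) (i : Nat) (h : i < ps.length) :
    ((ps.flatMap (fun ab => [ab.1, ab.2])).drop (2 * i)) =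
      ps[i].1 :: ps[i].2 :: ((ps.flatMap (fun ab => [ab.1, ab.2])).drop (2 * (i + 1))) := by
  induction ps generalizing i with
  | nil => simp at h
  | cons p ps ih =>
    cases i with
    | zero => simp
    | succ j =>
      have h' : j < ps.length := by simpa using h
      have e1 : 2 * (j + 1) = (2 * j) + 1 + 1 := by omega
      have e2 : 2 * (j + 1 + 1) = (2 * (j + 1)) + 1 + 1 := by omega
      rw [e1, e2]
      simp only [List.flatMap_cons, List.cons_append, List.drop_succ_cons, List.nil_append,
        List.getElem_cons_succ]
      exact ih j h'

-- the two-pointer loop equals the truncated zip-interleave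
theorem pvLoop3_eq (s : List Int) (l : Nat) (acc : List Int) :
    pvLoop3 s (l : Int) ((s.length : Int) - 1 - l) acc =
      acc ++ ((((s.zip s.reverse).flatMap (fun ab => [ab.1, ab.2])).drop (2 * l)).take
        (s.length - 2 * l)) := by
  rw [pvLoop3]
  by_cases hcond : (l : Int) ≤ (s.length : Int) - 1 - l
  · rw [if_pos hcond]
    dsimp only
    have hln : 2 * l + 1 ≤ s.length := by omega
    have hllt : l < s.length := by omega
    have hget_l : PySem.List.pyGetD s (l : Int) 0 = s[l] := by
      rw [PySem.List.pyGetD_natCast, List.getD_eq_getElem _ _ hllt]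
    have hr : ((s.length : Int) - 1 - l) = ((s.length - 1 - l : Nat) : Int) := by omega
    have hget_r : PySem.List.pyGetD s ((s.length : Int) - 1 - l) 0 = s[s.length - 1 - l] := by
      rw [hr, PySem.List.pyGetD_natCast, List.getD_eq_getElem _ _ (by omega)]
    have hdrop := pvFlat_drop (s.zip s.reverse) l (by simp [List.length_zip]; omega)
    have hzl : (s.zip s.reverse)[l]'(by simp; omega) = (s[l], s[s.length - 1 - l]) := by
      simp [List.getElem_zip, List.getElem_reverse]
    have harg1 : (l : Int) + 1 = ((l + 1 : Nat) : Int) := by push_cast; ring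
    have harg2 : ((s.length : Int) - 1 - l) - 1 = (s.length : Int) - 1 - ((l + 1 : Nat) : Int) := by
      push_cast; ring
    rw [hget_l, hget_r, harg1, harg2, pvLoop3_eq s (l + 1)]
    rw [hdrop, hzl]
    by_cases heq : (l : Int) = (s.length : Int) - 1 - l
    · rw [if_neg (not_not_intro heq)]
      have h0 : s.length - 2 * (l + 1) = 0 := by omega
      rw [h0, List.take_zero, List.append_nil,
        show s.length - 2 * l = 1 by omega]
      simp
    · rw [if_pos heq]
      rw [show s.length - 2 * l = (s.length - 2 * (l + 1)) + 1 + 1 by omega]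
      simp [List.take_succ_cons]
  · rw [if_neg hcond]
    have h0 : s.length - 2 * l = 0 := by omega
    rw [h0, List.take_zero, List.append_nil]
termination_by s.length - l
decreasing_by omega

theorem pvPath1_ne (c : Int) (rest : List Int) :
    (PySem.List.slice? (c :: rest) none none 2).getD []
      ++ (PySem.List.slice? (c :: rest) (some (-2)) none (-2)).getD [] ≠ [] := by
  intro hnil
  rw [List.append_eq_nil_iff] at hnil
  have h1 := hnil.1
  revert h1
  simp only [PySem.List.slice?, PySem.List.sliceIndices]
  norm_num
  exact ⟨0, by omega, by omega⟩

theorem pvPath2_ne (c : Int) (rest : List Int) :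
    (PySem.List.slice? (c :: rest) (some 1) none 2).getD []
      ++ (PySem.List.slice? (c :: rest) (some (-1)) none (-2)).getD [] ≠ [] := by
  intro hnil
  rw [List.append_eq_nil_iff] at hnil
  have h2 := hnil.2
  revert h2
  simp only [PySem.List.slice?, PySem.List.sliceIndices]
  norm_num
  constructor <;> omega

-- ===== VERDICT (by name: the statement is the Claim_ definition above) =====
theorem minJumpCost_spec : Claim_equal_minJumpCost := by
  intro stones _ hpre
  unfold Spec_minJumpCost minJumpCost minJumpCost_alt
  dsimp only
  rcases hs : stones with _ | ⟨c, rest⟩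
  · exact absurd hs hpre
  have e1 := pvCycleCost_eq _ (pvPath1_ne c rest)
  have e2 := pvCycleCost_eq _ (pvPath2_ne c rest)
  -- path3: both sides are the first n entries of the zip-interleave
  set s := c :: rest with hsdef
  set I := (s.zip s.reverse).flatMap (fun ab => [ab.1, ab.2]) with hI
  have hA3 : pvLoop3 s 0 (PySem.List.len s - 1) [] = I.take s.length := by
    have h0 : (0 : Int) = ((0 : Nat) : Int) := rfl
    have h1 : PySem.List.len s - 1 = (s.length : Int) - 1 - ((0 : Nat) : Int) := by
      simp [PySem.List.len_eq]
    rw [h0, h1, pvLoop3_eq s 0 []]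
    simp
    rfl
  have hB3 : PySem.List.slice
      ((s.zip ((PySem.List.slice? s none none (-1)).getD [])).flatMap
        (fun ab => [ab.1, ab.2])) none (some (PySem.List.len s)) = I.take s.length := by
    rw [PySem.List.slice?_none_none_neg_one, Option.getD_some, PySem.List.len_eq,
      PySem.List.slice_to_natCast]
  have hlenI : I.length = 2 * s.length := by
    rw [hI, pvFlat_length, List.length_zip, List.length_reverse, Nat.min_self]
  have hne3 : I.take s.length ≠ [] := by
    have hlen : (I.take s.length).length = s.length := by
      rw [List.length_take, hlenI]; omega
    intro hnil
    rw [hnil, hsdef] at hlen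
    simp at hlen
  have e3 : pvCycleCost (I.take s.length) = pvCost (I.take s.length) :=
    pvCycleCost_eq _ hne3
  rw [hA3, hB3, e1, e2, e3]
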